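-- pv_equiv track=rewrite | github.com/azhar0100/gasOpcodeExtractorPublic | find_binary_instruction_sets.py | separate_dumped_data_sections
-- ===== SOURCE A (Python) =====
-- def separate_dumped_data_sections(objdumped_data):
--     sections = []
--     section = []
--     for line in objdumped_data:
--         if line.startswith('Disassembly of section'):
--             if section:
--                 sections.append(section)
--             section = []
--         section.append(line)
--     sections.append(section)
--     return sections
-- ===== SOURCE B (Python) =====
-- def separate_dumped_data_sections(objdumped_data):
--     lines = list(objdumped_data)
--     bounds = [0] + [i for i, line in enumerate(lines)
--                     if i > 0 and line.startswith('Disassembly of section')] + [len(lines)]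
--     return [lines[bounds[j]:bounds[j + 1]] for j in range(len(bounds) - 1)]
-- ===== Notes on version B (the rewrite author's own statement) =====
-- stated objective: alternative
-- what changed: B drops A's running-accumulator loop: it collects the boundary indices of delimiter lines (index > 0) in one pass and returns the input's slices between consecutive boundaries.
import Mathlib
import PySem

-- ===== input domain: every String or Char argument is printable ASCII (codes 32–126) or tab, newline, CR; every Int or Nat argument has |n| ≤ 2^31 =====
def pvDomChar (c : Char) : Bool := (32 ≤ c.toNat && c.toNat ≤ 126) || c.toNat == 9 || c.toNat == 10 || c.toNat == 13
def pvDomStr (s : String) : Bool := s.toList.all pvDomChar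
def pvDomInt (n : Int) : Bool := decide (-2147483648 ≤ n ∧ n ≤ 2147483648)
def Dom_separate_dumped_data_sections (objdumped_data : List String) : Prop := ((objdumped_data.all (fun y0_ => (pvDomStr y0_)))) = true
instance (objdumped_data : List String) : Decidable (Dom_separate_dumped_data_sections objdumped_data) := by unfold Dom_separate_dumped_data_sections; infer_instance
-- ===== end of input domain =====

-- B computes delimiter boundary indices in one pass and returns the slices between
-- consecutive boundaries, instead of A's running-accumulator loop (alternative, same cost).

-- ===== PORT A =====
-- A's loop body: state = (sections, section)
def pvStepA (st : List (List String) × List String) (line : String) :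
    List (List String) × List String :=
  if PySem.Str.startswith line "Disassembly of section" then
    ((if st.2.isEmpty then st.1 else st.1 ++ [st.2]), [line])
  else
    (st.1, st.2 ++ [line])

def separate_dumped_data_sections (objdumped_data : List String) : List (List String) :=
  let st := objdumped_data.foldl pvStepA ([], [])
  st.1 ++ [st.2]

-- ===== PORT B =====
def separate_dumped_data_sections_alt (objdumped_data : List String) : List (List String) :=
  let lines := objdumped_data
  let bounds : List Int :=
    [0] ++
    (((PySem.List.enumerate lines).filter
        (fun p => decide (0 < p.1) && PySem.Str.startswith p.2 "Disassembly of section")).map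
      (fun p => p.1)) ++
    [(lines.length : Int)]
  (List.range (bounds.length - 1)).map (fun j =>
    PySem.List.slice lines (some (bounds.getD j 0)) (some (bounds.getD (j + 1) 0)))

-- ===== PRECONDITION & SPEC =====
def Spec_separate_dumped_data_sections (objdumped_data : List String) (out : List (List String)) : Prop := out = separate_dumped_data_sections_alt objdumped_data
instance (objdumped_data : List String) (out : List (List String)) : Decidable (Spec_separate_dumped_data_sections objdumped_data out) := by unfold Spec_separate_dumped_data_sections; infer_instance

-- ===== CLAIM (what is proved, stated in full; the proofs are below) =====
def Claim_equal_separate_dumped_data_sections : Prop := ∀ (objdumped_data : List String), Dom_separate_dumped_data_sections objdumped_data → Spec_separate_dumped_data_sections objdumped_data (separate_dumped_data_sections objdumped_data)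

-- ===== LEMMAS AND PROOFS =====

-- map over consecutive index pairs, as a structural recursion
def pvPairMap (f : Int → Int → List String) : List Int → List (List String)
  | a :: b :: rest => f a b :: pvPairMap f (b :: rest)
  | _ => []

-- the delimiter indices (index > 0) of a list of lines
def pvDelims (lines : List String) : List Int :=
  ((PySem.List.enumerate lines).filter
      (fun p => decide (0 < p.1) && PySem.Str.startswith p.2 "Disassembly of section")).map
    (fun p => p.1)

theorem pvRangeMap_eq_pairMap (f : Int → Int → List String) :
    ∀ (bs : List Int),
      (List.range (bs.length - 1)).map
          (fun j => f (bs.getD j 0) (bs.getD (j + 1) 0)) = pvPairMap f bs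
  | [] => by simp [pvPairMap]
  | [a] => by simp [pvPairMap]
  | a :: b :: rest => by
    have ih := pvRangeMap_eq_pairMap f (b :: rest)
    have hlen : (a :: b :: rest).length - 1 = ((b :: rest).length - 1) + 1 := by simp
    rw [hlen, List.range_succ_eq_map, List.map_cons, List.map_map]
    simp only [pvPairMap]
    congr 1

theorem pvPairMap_congr (f g : Int → Int → List String) :
    ∀ (bs : List Int), (∀ a ∈ bs, ∀ b ∈ bs, f a b = g a b) →
      pvPairMap f bs = pvPairMap g bs
  | [] => by intro _; rfl
  | [a] => by intro _; rfl
  | a :: b :: rest => by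
    intro h
    simp only [pvPairMap]
    rw [h a (by simp) b (by simp),
      pvPairMap_congr f g (b :: rest)
        (fun x hx y hy => h x (List.mem_cons_of_mem _ hx) y (List.mem_cons_of_mem _ hy))]

theorem pvPairMap_snoc (f : Int → Int → List String) :
    ∀ (bs : List Int) (hbs : bs ≠ []) (a : Int),
      pvPairMap f (bs ++ [a]) = pvPairMap f bs ++ [f (bs.getLast hbs) a]
  | [] => by intro h; exact absurd rfl h
  | [c] => by intro _ a; simp [pvPairMap]
  | c :: d :: rest => by
    intro _ a
    have ih := pvPairMap_snoc f (d :: rest) (by simp) a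
    simp only [List.cons_append, pvPairMap] at ih ⊢
    rw [ih]
    simp [List.getLast]

-- the rewritten form of port B
theorem pvAlt_eq (lines : List String) :
    separate_dumped_data_sections_alt lines =
      pvPairMap (fun a b => PySem.List.slice lines (some a) (some b))
        (0 :: (pvDelims lines ++ [(lines.length : Int)])) := by
  unfold separate_dumped_data_sections_alt pvDelims
  rw [← pvRangeMap_eq_pairMap]
  rfl

theorem pvDelims_mem (lines : List String) :
    ∀ i ∈ pvDelims lines, 0 ≤ i ∧ i ≤ (lines.length : Int) := by
  intro i hi
  unfold pvDelims at hi
  simp only [List.mem_map, List.mem_filter] at hi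
  obtain ⟨p, ⟨hp, _⟩, rfl⟩ := hi
  rw [PySem.List.mem_enumerate_iff] at hp
  obtain ⟨k, hk, rfl⟩ := hp
  simp
  omega

theorem pvDelims_append (lines : List String) (x : String) :
    pvDelims (lines ++ [x]) =
      pvDelims lines ++
        (if lines.length ≠ 0 ∧
            PySem.Str.startswith x "Disassembly of section" = true
         then [(lines.length : Int)] else []) := by
  unfold pvDelims
  rw [PySem.List.enumerate_append, List.filter_append, List.map_append]
  congr 1
  rw [PySem.List.enumerate_cons, PySem.List.enumerate_nil]
  simp only [List.filter_cons, List.filter_nil]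
  by_cases hd : PySem.Str.startswith x "Disassembly of section" = true
  · by_cases h0 : lines.length = 0
    · rw [if_neg (by simp [h0]), if_neg (by simp [h0])]
      rfl
    · rw [if_pos (by rw [hd]; simp; omega), if_pos ⟨h0, hd⟩]
      simp
  · rw [if_neg (by simp; intro _; simpa using hd),
      if_neg (by simp; intro _; simpa using hd)]
    rfl

-- slice stability lemmas
theorem pvSlice_append_stable (lines : List String) (x : String) (a b : Int)
    (ha : 0 ≤ a) (hb : 0 ≤ b) (hbn : b ≤ (lines.length : Int)) :
    PySem.List.slice (lines ++ [x]) (some a) (some b) =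
      PySem.List.slice lines (some a) (some b) := by
  rw [PySem.List.slice_toNat _ ha hb, PySem.List.slice_toNat _ ha hb]
  have hble : b.toNat ≤ lines.length := by omega
  by_cases hab : a.toNat ≤ lines.length
  · rw [List.drop_append_of_le_length hab,
      List.take_append_of_le_length (by simp only [List.length_drop]; omega)]
  · have h1 : (lines ++ [x]).length ≤ a.toNat := by simp only [List.length_append, List.length_cons, List.length_nil]; omega
    rw [List.drop_of_length_le h1, List.drop_of_length_le (l := lines) (by omega)]

theorem pvSlice_append_last (lines : List String) (x : String) (a : Int)
    (ha : 0 ≤ a) (han : a ≤ (lines.length : Int)) :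
    PySem.List.slice (lines ++ [x]) (some a) (some ((lines.length : Int) + 1)) =
      PySem.List.slice lines (some a) (some (lines.length : Int)) ++ [x] := by
  rw [PySem.List.slice_toNat _ ha (by omega), PySem.List.slice_toNat _ ha (by positivity)]
  have h1 : a.toNat ≤ lines.length := by omega
  rw [List.drop_append_of_le_length h1,
    List.take_of_length_le (by simp only [List.length_append, List.length_drop,
      List.length_cons, List.length_nil]; omega),
    List.take_of_length_le (by simp only [List.length_drop]; omega)]

-- A-side: the current section is nonempty once at least one line was consumed
theorem pvStepA_snd_ne (st : List (List String) × List String) (line : String) :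
    (pvStepA st line).2 ≠ [] := by
  unfold pvStepA
  split_ifs <;> simp

theorem pvFoldA_snd_ne (lines : List String) (st : List (List String) × List String)
    (h : lines ≠ []) : (lines.foldl pvStepA st).2 ≠ [] := by
  induction lines generalizing st with
  | nil => exact absurd rfl h
  | cons l rest ih =>
    rw [List.foldl_cons]
    cases rest with
    | nil => simpa using pvStepA_snd_ne st l
    | cons r rs => exact ih _ (by simp)

-- main equivalence, by induction from the right
theorem pvMain : ∀ (lines : List String),
    separate_dumped_data_sections lines = separate_dumped_data_sections_alt lines := by
  intro lines
  induction lines using List.reverseRecOn with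
  | nil => decide
  | append_singleton ls x ih =>
    have hA : separate_dumped_data_sections (ls ++ [x]) =
        (pvStepA (ls.foldl pvStepA ([], [])) x).1 ++
          [(pvStepA (ls.foldl pvStepA ([], [])) x).2] := by
      simp [separate_dumped_data_sections, List.foldl_append]
    set F := ls.foldl pvStepA ([], []) with hF
    have hAls : separate_dumped_data_sections ls = F.1 ++ [F.2] := rfl
    have hbound : ∀ a ∈ (0 :: (pvDelims ls ++ [(ls.length : Int)])),
        0 ≤ a ∧ a ≤ (ls.length : Int) := by
      intro a ha
      rcases List.mem_cons.mp ha with rfl | h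
      · exact ⟨le_refl 0, Int.natCast_nonneg _⟩
      rcases List.mem_append.mp h with h1 | h2
      · exact pvDelims_mem ls a h1
      · rw [List.mem_singleton.mp h2]
        exact ⟨Int.natCast_nonneg _, le_refl _⟩
    by_cases hc : ls.length ≠ 0 ∧ PySem.Str.startswith x "Disassembly of section" = true
    · -- a real delimiter appended: a new section [x] starts
      have hB : separate_dumped_data_sections_alt (ls ++ [x]) =
          separate_dumped_data_sections_alt ls ++ [[x]] := by
        rw [pvAlt_eq, pvDelims_append, if_pos hc]
        have hshape : (0 :: ((pvDelims ls ++ [(ls.length : Int)]) ++ [(↑(ls ++ [x]).length : Int)]))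
            = (0 :: (pvDelims ls ++ [(ls.length : Int)])) ++ [((ls.length : Int) + 1)] := by
          simp
        rw [hshape, pvPairMap_snoc _ _ (by simp) _]
        have hlast : (0 :: (pvDelims ls ++ [(ls.length : Int)])).getLast (by simp)
            = (ls.length : Int) := by
          rw [List.getLast_cons (by simp),
            List.getLast_append_of_ne_nil _ (by simp)]
          rfl
        rw [hlast]
        congr 1
        · rw [pvAlt_eq]
          exact pvPairMap_congr _ _ _ (fun a ha b hb =>
            pvSlice_append_stable ls x a b (hbound a ha).1 (hbound b hb).1 (hbound b hb).2)
        · rw [pvSlice_append_last ls x _ (by simp) (by simp),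
            PySem.List.slice_toNat ls (by simp) (by simp)]
          simp
      rw [hB, ← ih, hA, hAls]
      have hcur : F.2 ≠ [] := by
        rw [hF]; exact pvFoldA_snd_ne ls _ (by intro h; simp [h] at hc)
      unfold pvStepA
      rw [if_pos hc.2, if_neg (by simpa using hcur)]
    · -- not a split point: x extends the last section
      have hB : separate_dumped_data_sections_alt (ls ++ [x]) =
          pvPairMap (fun a b => PySem.List.slice ls (some a) (some b)) (0 :: pvDelims ls) ++
            [PySem.List.slice ls (some ((0 :: pvDelims ls).getLast (by simp)))
              (some (ls.length : Int)) ++ [x]] := by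
        rw [pvAlt_eq, pvDelims_append, if_neg hc]
        have hshape : (0 :: ((pvDelims ls ++ []) ++ [(↑(ls ++ [x]).length : Int)]))
            = (0 :: pvDelims ls) ++ [((ls.length : Int) + 1)] := by
          simp
        rw [hshape, pvPairMap_snoc _ _ (by simp) _]
        have hbound' : ∀ a ∈ (0 :: pvDelims ls), 0 ≤ a ∧ a ≤ (ls.length : Int) := by
          intro a ha
          apply hbound
          rcases List.mem_cons.mp ha with rfl | h
          · exact List.mem_cons_self
          · exact List.mem_cons_of_mem _ (List.mem_append_left _ h)
        have hlastb := hbound' _ (List.getLast_mem (l := 0 :: pvDelims ls) (by simp))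
        congr 1
        · exact pvPairMap_congr _ _ _ (fun a ha b hb =>
            pvSlice_append_stable ls x a b (hbound' a ha).1 (hbound' b hb).1 (hbound' b hb).2)
        · rw [pvSlice_append_last ls x _ hlastb.1 hlastb.2]
      have hBls : separate_dumped_data_sections_alt ls =
          pvPairMap (fun a b => PySem.List.slice ls (some a) (some b)) (0 :: pvDelims ls) ++
            [PySem.List.slice ls (some ((0 :: pvDelims ls).getLast (by simp)))
              (some (ls.length : Int))] := by
        rw [pvAlt_eq]
        have hshape : (0 :: (pvDelims ls ++ [(ls.length : Int)]))
            = (0 :: pvDelims ls) ++ [(ls.length : Int)] := by simp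
        rw [hshape, pvPairMap_snoc _ _ (by simp) _]
      -- identify the pieces via the IH
      have hids : F.1 ++ [F.2] =
          pvPairMap (fun a b => PySem.List.slice ls (some a) (some b)) (0 :: pvDelims ls) ++
            [PySem.List.slice ls (some ((0 :: pvDelims ls).getLast (by simp)))
              (some (ls.length : Int))] := by
        rw [← hAls, ih, hBls]
      have hsplit := List.append_inj' hids rfl
      rw [hA, hB, ← hsplit.1]
      have hcur : F.2 = PySem.List.slice ls (some ((0 :: pvDelims ls).getLast (by simp)))
          (some (ls.length : Int)) := by
        have := hsplit.2
        simpa using this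
      rw [← hcur]
      unfold pvStepA
      by_cases hd : PySem.Str.startswith x "Disassembly of section" = true
      · -- then ls = [], so the current section is empty
        have hls : ls = [] := by
          by_contra h
          exact hc ⟨by simpa using h, hd⟩
        have hF2 : F.2 = [] := by rw [hF, hls]; rfl
        rw [if_pos hd, if_pos (by simp [hF2])]
        simp [hF2]
      · rw [if_neg hd]

-- ===== VERDICT (by name: the statement is the Claim_ definition above) =====
theorem separate_dumped_data_sections_spec : Claim_equal_separate_dumped_data_sections := by
  intro lines _
  exact pvMain lines
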